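-- pv_equiv track=rewrite | github.com/241721/Advent-Of-Code-2020 | Day 6/day6_part2.py | pasre_input_to_groups
-- ===== SOURCE A (Python) =====
-- def pasre_input_to_groups(input):
--     groups = []
--     group = set()
--     person = set()
--     sw = True
--     for line in input:
--         if len(line) == 0:
--             groups.append(set(group))
--             group.clear()
--             sw = True
--         else:
--             if sw:
--                 for l in line:
--                     group.add(l)
--                 sw = False
--             else:
--                 for l in line:
--                     person.add(l)
--                 group = group.intersection(person)
--                 person.clear()
--     groups.append(group)
--     return groups
-- ===== SOURCE B (Python) =====
-- def pasre_input_to_groups(input):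
--     groups = []
--     counts = {}
--     people = 0
--     for line in input:
--         if len(line) == 0:
--             groups.append({l for l, c in counts.items() if c == people})
--             counts = {}
--             people = 0
--         else:
--             for l in dict.fromkeys(line):
--                 counts[l] = counts.get(l, 0) + 1
--             people += 1
--     groups.append({l for l, c in counts.items() if c == people})
--     return groups
-- ===== Notes on version B (the rewrite author's own statement) =====
-- stated objective: alternative
-- what changed: Replaces A's sw-flag running set-intersection per group with a single per-group letter counter plus a people count, emitting {letter : count == people} when a group closes.
import Mathlib
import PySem

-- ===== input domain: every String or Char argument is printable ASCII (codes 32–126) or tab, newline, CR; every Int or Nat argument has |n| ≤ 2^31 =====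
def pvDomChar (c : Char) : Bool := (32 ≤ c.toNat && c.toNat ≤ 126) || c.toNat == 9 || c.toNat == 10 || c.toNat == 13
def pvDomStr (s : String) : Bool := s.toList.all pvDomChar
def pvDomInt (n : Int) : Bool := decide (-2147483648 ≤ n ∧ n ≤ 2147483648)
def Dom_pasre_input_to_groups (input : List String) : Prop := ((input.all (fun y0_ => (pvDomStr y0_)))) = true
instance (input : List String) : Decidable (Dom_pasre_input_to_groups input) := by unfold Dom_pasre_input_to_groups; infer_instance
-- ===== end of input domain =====

-- B replaces A's running set-intersection (sw flag + person set) by a per-group letter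
-- counter and a people count, emitting the letters whose count equals the people count.

-- iterating over the characters of a Python string yields 1-character strings
def pvLetters (line : String) : List String := line.toList.map (fun c => c.toString)

-- ===== PORT A =====
-- state: (groups, group, sw); person is filled and cleared inside one iteration, so it is local
def pvAStep (st : List (List String) × PySem.Set String × Bool) (line : String) :
    List (List String) × PySem.Set String × Bool :=
  if PySem.Str.len line == 0 then
    (st.1 ++ [PySem.Set.ofList st.2.1], PySem.Set.empty, true)
  else if st.2.2 then
    (st.1, (pvLetters line).foldl PySem.Set.add st.2.1, false)
  else
    (st.1, PySem.Set.inter st.2.1 ((pvLetters line).foldl PySem.Set.add PySem.Set.empty), st.2.2)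

def pasre_input_to_groups (input : List String) : List (List String) :=
  let s := input.foldl pvAStep ([], PySem.Set.empty, true)
  s.1 ++ [s.2.1]

-- ===== PORT B =====
-- {l for l, c in counts.items() if c == people}
def pvFinalize (d : PySem.Dict String Int) (n : Int) : List String :=
  PySem.Set.ofList ((d.items.filter (fun p => p.2 == n)).map (fun p => p.1))

-- state: (groups, counts, people)
def pvBStep (st : List (List String) × PySem.Dict String Int × Int) (line : String) :
    List (List String) × PySem.Dict String Int × Int :=
  if PySem.Str.len line == 0 then
    (st.1 ++ [pvFinalize st.2.1 st.2.2], PySem.Dict.empty, 0)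
  else
    (st.1,
     (PySem.List.dedup (pvLetters line)).foldl (fun d l => d.insert l (d.getD l 0 + 1)) st.2.1,
     st.2.2 + 1)

def pasre_input_to_groups_alt (input : List String) : List (List String) :=
  let s := input.foldl pvBStep ([], PySem.Dict.empty, 0)
  s.1 ++ [pvFinalize s.2.1 s.2.2]

-- ===== PRECONDITION & SPEC =====
def Spec_pasre_input_to_groups (input : List String) (out : List (List String)) : Prop := out = pasre_input_to_groups_alt input
instance (input : List String) (out : List (List String)) : Decidable (Spec_pasre_input_to_groups input out) := by unfold Spec_pasre_input_to_groups; infer_instance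

-- ===== CLAIM (what is proved, stated in full; the proofs are below) =====
def Claim_equal_pasre_input_to_groups : Prop := ∀ (input : List String), Dom_pasre_input_to_groups input → Spec_pasre_input_to_groups input (pasre_input_to_groups input)

-- ===== LEMMAS AND PROOFS =====

-- items of the counting loop over a duplicate-free person P: keys already present and in P
-- get +1, fresh keys of P are appended with count 1
theorem pvStepItems (P : List String) (d : PySem.Dict String Int)
    (hP : P.Nodup) (hd : d.keys.Nodup) :
    (P.foldl (fun d l => d.insert l (d.getD l 0 + 1)) d).items
      = d.items.map (fun p => if p.1 ∈ P then (p.1, p.2 + 1) else p)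
        ++ (P.filter (fun l => !d.contains l)).map (fun l => (l, (1 : Int))) := by
  induction P generalizing d with
  | nil => simp
  | cons l P' ih =>
    obtain ⟨hl, hP'⟩ := List.nodup_cons.mp hP
    simp only [List.foldl_cons]
    rw [ih (d.insert l (d.getD l 0 + 1)) hP' (PySem.Dict.nodup_keys_insert d l _ hd)]
    by_cases hc : d.contains l = true
    · rw [PySem.Dict.items_insert_of_contains d _ hc]
      rw [List.map_map]
      have hmap : ∀ p ∈ d.items,
          ((fun p => if p.1 ∈ P' then (p.1, p.2 + 1) else p) ∘
            (fun p => if (p.1 == l) = true then (l, d.getD l 0 + 1) else p)) p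
          = (fun p => if p.1 ∈ l :: P' then (p.1, p.2 + 1) else p) p := by
        intro p hp
        by_cases he : p.1 = l
        · have : d.getD l 0 = p.2 := by
            have := PySem.Dict.getD_of_mem_items d (k := p.1) (v := p.2) hp hd 0
            rw [he] at this; exact this
          simp [he, hl, this]
        · simp [he]
      rw [List.map_congr_left hmap]
      have hfil : P'.filter (fun x => !(d.insert l (d.getD l 0 + 1)).contains x)
          = P'.filter (fun x => !d.contains x) := by
        apply List.filter_congr
        intro x hx
        have hxl : x ≠ l := fun h => hl (h ▸ hx)
        rw [PySem.Dict.contains_insert]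
        simp [hxl]
      rw [hfil]
      have : (l :: P').filter (fun x => !d.contains x) = P'.filter (fun x => !d.contains x) := by
        simp [hc]
      rw [this]
    · have hc' : d.contains l = false := by simpa using hc
      rw [PySem.Dict.items_insert_of_not_contains d _ hc']
      rw [PySem.Dict.getD_of_not_contains d 0 hc']
      have hnotkey : ∀ p ∈ d.items, p.1 ≠ l := by
        intro p hp he
        have : d.contains p.1 = true := by
          rw [PySem.Dict.contains_eq_decide_mem_keys]
          exact decide_eq_true (PySem.Dict.mem_keys_of_mem_items d hp)
        rw [he] at this; rw [this] at hc'; exact absurd hc' (by simp)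
      rw [List.map_append]
      have hmap : ∀ p ∈ d.items,
          (fun p => if p.1 ∈ P' then (p.1, p.2 + 1) else p) p
          = (fun p => if p.1 ∈ l :: P' then (p.1, p.2 + 1) else p) p := by
        intro p hp
        have := hnotkey p hp
        simp [List.mem_cons, this]
      rw [List.map_congr_left hmap]
      have hfil : P'.filter (fun x => !(d.insert l (0 + 1 : Int)).contains x)
          = P'.filter (fun x => !d.contains x) := by
        apply List.filter_congr
        intro x hx
        have hxl : x ≠ l := fun h => hl (h ▸ hx)
        rw [PySem.Dict.contains_insert]
        simp [hxl]
      rw [hfil]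
      have hlmem : l ∈ l :: P' := List.mem_cons_self
      have : (l :: P').filter (fun x => !d.contains x) = l :: P'.filter (fun x => !d.contains x) := by
        simp [hc']
      rw [this]
      simp [hl]

theorem pvFinalize_nodup (d : PySem.Dict String Int) (n : Int) (hd : d.keys.Nodup) :
    ((d.items.filter (fun p => p.2 == n)).map (fun p => p.1)).Nodup := by
  have hsub : ((d.items.filter (fun p => p.2 == n)).map (fun p => p.1)).Sublist
      (d.items.map (fun p => p.1)) := List.Sublist.map _ List.filter_sublist
  have hk : d.keys = d.items.map (fun p => p.1) := by simp [PySem.Dict.keys]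
  exact (hk ▸ hd).sublist hsub

theorem pvFinalize_eq_list (d : PySem.Dict String Int) (n : Int) (hd : d.keys.Nodup) :
    pvFinalize d n = (d.items.filter (fun p => p.2 == n)).map (fun p => p.1) := by
  unfold pvFinalize
  exact PySem.Set.ofList_eq_self_of_nodup _ (pvFinalize_nodup d n hd)

theorem pvMapFilterCongr {α β : Type} (l : List α) (q r : α → Bool) (f g : α → β)
    (h : ∀ a ∈ l, q a = r a ∧ (r a = true → f a = g a)) :
    (l.filter q).map f = (l.filter r).map g := by
  induction l with
  | nil => simp
  | cons a t ih =>
    have ha := h a List.mem_cons_self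
    have ht : ∀ a ∈ t, q a = r a ∧ (r a = true → f a = g a) :=
      fun x hx => h x (List.mem_cons_of_mem a hx)
    by_cases hr : r a = true
    · rw [List.filter_cons, List.filter_cons, ha.1, hr]
      simp [ih ht, ha.2 hr]
    · have : r a = false := by simpa using hr
      rw [List.filter_cons, List.filter_cons, ha.1, this]
      simpa using ih ht

-- counting one more person and filtering at people+1 is intersecting with that person
theorem pvFinalize_step (P : List String) (d : PySem.Dict String Int) (n : Int)
    (hP : P.Nodup) (hd : d.keys.Nodup) (hv : ∀ p ∈ d.items, p.2 ≤ n) (hn : 1 ≤ n) :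
    pvFinalize (P.foldl (fun d l => d.insert l (d.getD l 0 + 1)) d) (n + 1)
      = PySem.Set.inter (pvFinalize d n) P := by
  have hd' : (P.foldl (fun d l => d.insert l (d.getD l 0 + 1)) d).keys.Nodup :=
    PySem.Dict.nodup_keys_foldl_insert P _ d hd
  rw [pvFinalize_eq_list _ _ hd', pvStepItems P d hP hd]
  rw [PySem.Set.inter, pvFinalize_eq_list d n hd]
  rw [List.filter_append, List.map_append]
  have h2 : ((P.filter (fun l => !d.contains l)).map (fun l => (l, (1:Int)))).filter
      (fun p => p.2 == n + 1) = [] := by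
    rw [List.filter_eq_nil_iff]
    intro p hp
    obtain ⟨x, _, hfx⟩ := List.mem_map.mp hp
    rw [← hfx]
    simp; omega
  rw [h2, List.map_nil, List.append_nil]
  rw [List.filter_map, List.filter_map, List.filter_filter, List.map_map]
  apply pvMapFilterCongr
  intro p hp
  have hb := hv p hp
  by_cases hm : p.1 ∈ P
  · exact ⟨by simp [hm], fun _ => by simp [hm]⟩
  · refine ⟨?_, fun _ => by simp [hm]⟩
    simp [hm, PySem.Set.contains]
    omega

theorem pvFinalize_first (P : List String) (hP : P.Nodup) :
    pvFinalize (P.foldl (fun d l => d.insert l (d.getD l 0 + 1)) PySem.Dict.empty) 1 = P := by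
  have hd : (PySem.Dict.empty : PySem.Dict String Int).keys.Nodup := by decide
  have hd' : (P.foldl (fun d l => d.insert l (d.getD l 0 + 1)) (PySem.Dict.empty : PySem.Dict String Int)).keys.Nodup :=
    PySem.Dict.nodup_keys_foldl_insert P _ _ hd
  rw [pvFinalize_eq_list _ _ hd', pvStepItems P _ hP hd]
  have hie : (PySem.Dict.empty : PySem.Dict String Int).items = [] := rfl
  simp [hie, List.filter_map, Function.comp_def, List.map_map, PySem.Dict.contains_empty]

theorem pvStepBound (P : List String) (d : PySem.Dict String Int) (n : Int)
    (hP : P.Nodup) (hd : d.keys.Nodup) (hv : ∀ p ∈ d.items, p.2 ≤ n) (hn : 0 ≤ n) :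
    ∀ p ∈ (P.foldl (fun d l => d.insert l (d.getD l 0 + 1)) d).items, p.2 ≤ n + 1 := by
  intro p hp
  rw [pvStepItems P d hP hd] at hp
  rcases List.mem_append.mp hp with h | h
  · obtain ⟨q, hq, hfq⟩ := List.mem_map.mp h
    have := hv q hq
    by_cases hm : q.1 ∈ P
    · simp [hm] at hfq; rw [← hfq]; simp; omega
    · simp [hm] at hfq; rw [← hfq]; omega
  · obtain ⟨x, _, hfx⟩ := List.mem_map.mp h
    rw [← hfx]; simp; omega

-- the relation between A's (group, sw) and B's (counts, people) while inside one group
def pvInv (g : PySem.Set String) (sw : Bool) (d : PySem.Dict String Int) (n : Int) : Prop :=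
  d.keys.Nodup ∧ (∀ p ∈ d.items, p.2 ≤ n) ∧ g = pvFinalize d n ∧ sw = (n == 0)
    ∧ (n = 0 → d = PySem.Dict.empty) ∧ 0 ≤ n

theorem pvLoop (input : List String) : ∀ (groups : List (List String))
    (g : PySem.Set String) (sw : Bool) (d : PySem.Dict String Int) (n : Int),
    pvInv g sw d n →
    (input.foldl pvAStep (groups, g, sw)).1 = (input.foldl pvBStep (groups, d, n)).1 ∧
    pvInv (input.foldl pvAStep (groups, g, sw)).2.1 (input.foldl pvAStep (groups, g, sw)).2.2
          (input.foldl pvBStep (groups, d, n)).2.1 (input.foldl pvBStep (groups, d, n)).2.2 := by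
  induction input with
  | nil => intro groups g sw d n h; exact ⟨rfl, h⟩
  | cons line rest ih =>
    intro groups g sw d n hInv
    obtain ⟨hnd, hvb, hg, hsw, hd0, hn0⟩ := hInv
    simp only [List.foldl_cons]
    by_cases hlen : (PySem.Str.len line == 0) = true
    · have hl' : line = "" := by simpa using hlen
      have hA : pvAStep (groups, g, sw) line
          = (groups ++ [PySem.Set.ofList g], PySem.Set.empty, true) := by
        simp [pvAStep, hl']
      have hB : pvBStep (groups, d, n) line
          = (groups ++ [pvFinalize d n], PySem.Dict.empty, 0) := by
        simp [pvBStep, hl']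
      have hofl : PySem.Set.ofList g = pvFinalize d n := by
        rw [hg, pvFinalize_eq_list d n hnd]
        exact PySem.Set.ofList_eq_self_of_nodup _ (pvFinalize_nodup d n hnd)
      rw [hA, hB, hofl]
      apply ih
      refine ⟨by decide, ?_, by decide, rfl, fun _ => rfl, le_refl 0⟩
      intro p hp
      simp [show (PySem.Dict.empty : PySem.Dict String Int).items = [] from rfl] at hp
    · have hl' : ¬ line = "" := by simpa using hlen
      have hP : (PySem.List.dedup (pvLetters line)).Nodup := by
        rw [PySem.List.dedup_eq_ofList]; exact PySem.Set.nodup_ofList _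
      have hfoldadd : (pvLetters line).foldl PySem.Set.add PySem.Set.empty
          = PySem.List.dedup (pvLetters line) := by
        rw [PySem.List.dedup_eq_ofList, PySem.Set.ofList_eq_foldl]; rfl
      by_cases hswb : sw = true
      · have hn : n = 0 := by
          rw [hswb] at hsw; exact (beq_iff_eq.mp hsw.symm)
        subst hn
        have hde : d = PySem.Dict.empty := hd0 rfl
        subst hde
        have hgnil : g = [] := by
          rw [hg]; rfl
        have hA : pvAStep (groups, g, sw) line
            = (groups, (pvLetters line).foldl PySem.Set.add g, false) := by
          simp [pvAStep, hl', hswb]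
        have hB : pvBStep (groups, PySem.Dict.empty, 0) line
            = (groups,
               (PySem.List.dedup (pvLetters line)).foldl
                 (fun d l => d.insert l (d.getD l 0 + 1)) PySem.Dict.empty, 1) := by
          simp [pvBStep, hl']
        rw [hA, hB]
        apply ih
        refine ⟨PySem.Dict.nodup_keys_foldl_insert _ _ _ (by decide),
                pvStepBound _ _ 0 hP (by decide) (by intro p hp; simp [show (PySem.Dict.empty : PySem.Dict String Int).items = [] from rfl] at hp) (le_refl 0),
                ?_, by decide, by intro h; omega, by omega⟩
        rw [hgnil]
        show PySem.Set.ofList (pvLetters line) = _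
        rw [← PySem.List.dedup_eq_ofList, (pvFinalize_first _ hP)]
      · have hswf : sw = false := by
          cases sw
          · rfl
          · exact absurd rfl hswb
        have hne : ¬ (n = 0) := by
          intro h
          rw [hswf, h] at hsw
          simp at hsw
        have hn1 : 1 ≤ n := by omega
        have hA : pvAStep (groups, g, sw) line
            = (groups, PySem.Set.inter g ((pvLetters line).foldl PySem.Set.add PySem.Set.empty), sw) := by
          simp [pvAStep, hl', hswf]
        have hB : pvBStep (groups, d, n) line
            = (groups,
               (PySem.List.dedup (pvLetters line)).foldl
                 (fun d l => d.insert l (d.getD l 0 + 1)) d, n + 1) := by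
          simp [pvBStep, hl']
        rw [hA, hB]
        apply ih
        refine ⟨PySem.Dict.nodup_keys_foldl_insert _ _ _ hnd,
                pvStepBound _ _ n hP hnd hvb hn0, ?_, ?_, by intro h; omega, by omega⟩
        · rw [hfoldadd, hg, ← pvFinalize_step _ _ n hP hnd hvb hn1]
        · rw [hswf]
          symm
          rw [beq_eq_false_iff_ne]
          omega

-- ===== VERDICT (by name: the statement is the Claim_ definition above) =====
theorem pasre_input_to_groups_spec : Claim_equal_pasre_input_to_groups := by
  intro input _
  unfold Spec_pasre_input_to_groups pasre_input_to_groups pasre_input_to_groups_alt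
  have h0 : pvInv PySem.Set.empty true PySem.Dict.empty 0 := by
    refine ⟨by decide, ?_, by decide, rfl, fun _ => rfl, le_refl 0⟩
    intro p hp
    simp [show (PySem.Dict.empty : PySem.Dict String Int).items = [] from rfl] at hp
  obtain ⟨h1, hinv⟩ := pvLoop input [] PySem.Set.empty true PySem.Dict.empty 0 h0
  simp only
  rw [h1, hinv.2.2.1]
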